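-- pv_equiv track=rewrite | github.com/sohds/Ohs-practice-repository | PGS/[PGS] 코딩테스트 입문 day 20.py | solution
-- ===== SOURCE A (Python) =====
-- def solution(numbers):
--     neg_num = [ k for k in numbers if k < 0 ]
--     pos_num = [ j for j in numbers if j >= 0 ]
--     pos_num.sort(reverse=True)
--     if len(neg_num) > 1:
--         multi_neg = [ neg_num[i] * neg_num[i+1] for i in range(0, len(neg_num)-1)]
--         if pos_num[0] * pos_num[1] < max(multi_neg):
--             return max(multi_neg)
--         else:
--             return pos_num[0] * pos_num[1]
--     else:
--         return pos_num[0] * pos_num[1]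
-- ===== SOURCE B (Python) =====
-- def solution(numbers):
--     neg_num = [k for k in numbers if k < 0]
--     pos_num = [j for j in numbers if j >= 0]
--     m1 = max(pos_num)
--     rest = list(pos_num)
--     rest.remove(m1)
--     m2 = max(rest)
--     best_pos = m1 * m2
--     if len(neg_num) > 1:
--         best_neg = neg_num[0] * neg_num[1]
--         for a, b in zip(neg_num[1:], neg_num[2:]):
--             p = a * b
--             if best_neg < p:
--                 best_neg = p
--         return best_neg if best_pos < best_neg else best_pos
--     else:
--         return best_pos
-- ===== Notes on version B (the rewrite author's own statement) =====
-- stated objective: alternative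
-- what changed: Replaces the full descending sort of the nonnegatives by a max/remove/max scan for the top two, and replaces the materialised list of adjacent negative products plus max() by a single running-max loop over consecutive negative pairs.
-- outside the precondition, e.g. on solution([1, -2, -3]): A raises IndexError, B raises ValueError
import Mathlib
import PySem

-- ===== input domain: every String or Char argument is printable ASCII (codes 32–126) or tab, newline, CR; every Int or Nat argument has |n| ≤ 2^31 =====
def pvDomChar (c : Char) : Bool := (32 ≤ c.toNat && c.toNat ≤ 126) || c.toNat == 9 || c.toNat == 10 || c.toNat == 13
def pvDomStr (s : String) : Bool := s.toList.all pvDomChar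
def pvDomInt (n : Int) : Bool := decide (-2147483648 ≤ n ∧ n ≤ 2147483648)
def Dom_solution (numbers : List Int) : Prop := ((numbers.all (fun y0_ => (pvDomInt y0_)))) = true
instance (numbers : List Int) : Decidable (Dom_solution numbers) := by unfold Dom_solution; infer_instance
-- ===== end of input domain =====

-- B replaces the descending sort by a max/remove/max scan for the top two nonnegatives and the
-- materialised adjacent-product list + max() by a single running-max loop (no sorting).

-- ===== PORT A =====
def solution (numbers : List Int) : Int :=
  let negNum := numbers.filter (fun k => decide (k < 0))
  let posNum0 := numbers.filter (fun j => decide (0 ≤ j))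
  let posNum := PySem.List.sorted posNum0 (fun x => x) true
  if negNum.length > 1 then
    let multiNeg := (PySem.List.pyRange 0 ((negNum.length : Int) - 1) 1).map
      (fun i => PySem.List.pyGetD negNum i 0 * PySem.List.pyGetD negNum (i + 1) 0)
    let m := (PySem.List.max? multiNeg (fun y => y)).getD 0
    if PySem.List.pyGetD posNum 0 0 * PySem.List.pyGetD posNum 1 0 < m then m
    else PySem.List.pyGetD posNum 0 0 * PySem.List.pyGetD posNum 1 0
  else PySem.List.pyGetD posNum 0 0 * PySem.List.pyGetD posNum 1 0

-- ===== PORT B =====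
def solution_alt (numbers : List Int) : Int :=
  let negNum := numbers.filter (fun k => decide (k < 0))
  let posNum := numbers.filter (fun j => decide (0 ≤ j))
  let m1 := (PySem.List.max? posNum (fun y => y)).getD 0
  let rest := (PySem.List.remove? posNum m1).getD []
  let m2 := (PySem.List.max? rest (fun y => y)).getD 0
  let bestPos := m1 * m2
  if negNum.length > 1 then
    let bestNeg := (List.zip (negNum.drop 1) (negNum.drop 2)).foldl
      (fun acc ab => if acc < ab.1 * ab.2 then ab.1 * ab.2 else acc)
      (PySem.List.pyGetD negNum 0 0 * PySem.List.pyGetD negNum 1 0)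
    if bestPos < bestNeg then bestNeg else bestPos
  else bestPos

-- ===== PRECONDITION & SPEC =====
-- Pre_ excludes inputs with fewer than two nonnegative numbers: A raises IndexError there (B raises too).
def Pre_solution (numbers : List Int) : Prop :=
  2 ≤ (numbers.filter (fun j => decide (0 ≤ j))).length
instance (numbers : List Int) : Decidable (Pre_solution numbers) := by unfold Pre_solution; infer_instance
def pvWitness_solution : List Int := [1, 2, -3, -4]

def Spec_solution (numbers : List Int) (out : Int) : Prop := out = solution_alt numbers
instance (numbers : List Int) (out : Int) : Decidable (Spec_solution numbers out) := by unfold Spec_solution; infer_instance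

-- ===== CLAIM (what is proved, stated in full; the proofs are below) =====
def Claim_equal_solution : Prop := ∀ (numbers : List Int), Dom_solution numbers → Pre_solution numbers → Spec_solution numbers (solution numbers)

-- ===== LEMMAS AND PROOFS =====

theorem top2_eq (pos : List Int) (h : 2 ≤ pos.length) :
    PySem.List.pyGetD (PySem.List.sorted pos (fun x => x) true) 0 0 *
      PySem.List.pyGetD (PySem.List.sorted pos (fun x => x) true) 1 0 =
    ((PySem.List.max? pos (fun y => y)).getD 0) *
      ((PySem.List.max? ((PySem.List.remove? pos ((PySem.List.max? pos (fun y => y)).getD 0)).getD []) (fun y => y)).getD 0) := by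
  have hperm : (PySem.List.sorted pos (fun x => x) true).Perm pos :=
    PySem.List.sorted_perm pos (fun x => x) true
  have hlen : 2 ≤ (PySem.List.sorted pos (fun x => x) true).length := by
    rw [hperm.length_eq]; exact h
  have hpw0 := PySem.List.sorted_pairwise_rev pos (fun x => x)
  match hs : PySem.List.sorted pos (fun x => x) true, hlen with
  | x :: y :: t, _ =>
    rw [hs] at hperm
    rw [hs] at hpw0
    have hxmax : ∀ z ∈ pos, z ≤ x := by
      intro z hz
      rcases List.mem_cons.mp (hperm.mem_iff.mpr hz) with h0 | h1
      · exact le_of_eq h0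
      · exact (List.pairwise_cons.mp hpw0).1 z h1
    have hx_mem : x ∈ pos := hperm.mem_iff.mp (by simp)
    have herase_perm : (pos.erase x).Perm (y :: t) := by
      have := hperm.symm.erase x
      rwa [List.erase_cons_head] at this
    have hy_mem_e : y ∈ pos.erase x := herase_perm.mem_iff.mpr (by simp)
    have hymax : ∀ z ∈ pos.erase x, z ≤ y := by
      intro z hz
      rcases List.mem_cons.mp (herase_perm.mem_iff.mp hz) with h0 | h1
      · exact le_of_eq h0
      · exact (List.pairwise_cons.mp (List.pairwise_cons.mp hpw0).2).1 z h1
    have hpos_ne : pos ≠ [] := by intro hh; rw [hh] at h; simp at h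
    obtain ⟨m, hm⟩ : ∃ m, PySem.List.max? pos (fun y => y) = some m := by
      cases hmm : PySem.List.max? pos (fun y => y) with
      | none => exact absurd ((PySem.List.max?_eq_none_iff pos (fun y => y)).mp hmm) hpos_ne
      | some m => exact ⟨m, rfl⟩
    have hmx : m = x := le_antisymm (hxmax m (PySem.List.max?_mem hm)) (PySem.List.max?_isMax hm x hx_mem)
    have hrem : PySem.List.remove? pos x = some (pos.erase x) := PySem.List.remove?_eq_some_erase pos x hx_mem
    obtain ⟨m2, hm2⟩ : ∃ m2, PySem.List.max? (pos.erase x) (fun y => y) = some m2 := by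
      cases hmm : PySem.List.max? (pos.erase x) (fun y => y) with
      | none =>
        exact absurd ((PySem.List.max?_eq_none_iff _ (fun y => y)).mp hmm)
          (by intro hh; rw [hh] at hy_mem_e; simp at hy_mem_e)
      | some m2 => exact ⟨m2, rfl⟩
    have hm2y : m2 = y := le_antisymm (hymax m2 (PySem.List.max?_mem hm2)) (PySem.List.max?_isMax hm2 y hy_mem_e)
    rw [hm]
    simp only [Option.getD_some]
    rw [hmx, hrem]
    simp only [Option.getD_some]
    rw [hm2, hm2y]
    simp [PySem.List.pyGetD]

theorem if_lt_eq_max (a p : Int) : (if a < p then p else a) = max a p := by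
  by_cases h : a < p
  · simp [h, max_eq_right h.le]
  · simp [h, max_eq_left (not_lt.mp h)]

theorem adjprods (x : Int) (xs : List Int) :
    (List.range xs.length).map (fun k => (x::xs).getD k 0 * (x::xs).getD (k+1) 0)
      = List.zipWith (· * ·) (x::xs) xs := by
  induction xs generalizing x with
  | nil => simp
  | cons y ys ih =>
    simp only [List.length_cons, List.range_succ_eq_map, List.map_cons, List.map_map]
    refine congrArg₂ _ rfl ?_
    rw [← ih y]
    rfl

theorem foldl_zip_max (xs ys : List Int) (init : Int) :
    (List.zip xs ys).foldl (fun acc ab => max acc (ab.1 * ab.2)) init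
      = (List.zipWith (· * ·) xs ys).foldl max init := by
  induction xs generalizing ys init with
  | nil => simp
  | cons x xt ih =>
    cases ys with
    | nil => simp
    | cons y yt => simp [List.zip_cons_cons, ih]

theorem foldl_zip_mul (xs ys : List Int) (init : Int) :
    (List.zip xs ys).foldl (fun acc ab => if acc < ab.1 * ab.2 then ab.1 * ab.2 else acc) init
      = (List.zipWith (· * ·) xs ys).foldl max init := by
  rw [show (fun (acc : Int) (ab : Int × Int) => if acc < ab.1 * ab.2 then ab.1 * ab.2 else acc)
      = (fun acc ab => max acc (ab.1 * ab.2)) from funext fun a => funext fun ab => if_lt_eq_max a _]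
  exact foldl_zip_max xs ys init

theorem negmax_eq (neg : List Int) (h : 1 < neg.length) :
    (PySem.List.max? ((PySem.List.pyRange 0 ((neg.length : Int) - 1) 1).map
        (fun i => PySem.List.pyGetD neg i 0 * PySem.List.pyGetD neg (i + 1) 0)) (fun y => y)).getD 0 =
    (List.zip (neg.drop 1) (neg.drop 2)).foldl
      (fun acc ab => if acc < ab.1 * ab.2 then ab.1 * ab.2 else acc)
      (PySem.List.pyGetD neg 0 0 * PySem.List.pyGetD neg 1 0) := by
  match neg, h with
  | a :: b :: t, _ =>
    have hcast : ((a :: b :: t).length : Int) - 1 = ((t.length + 1 : Nat) : Int) := by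
      simp
    rw [hcast, PySem.List.pyRange_zero_nat]
    rw [List.map_map]
    have hmap : (List.range (t.length + 1)).map
        ((fun i => PySem.List.pyGetD (a::b::t) i 0 * PySem.List.pyGetD (a::b::t) (i + 1) 0) ∘ (fun k : Nat => (k:Int)))
        = (List.range (b::t).length).map (fun k => (a::b::t).getD k 0 * (a::b::t).getD (k+1) 0) := by
      apply List.map_congr_left
      intro k hk
      simp only [Function.comp]
      have h1 : ((k:Int) + 1) = ((k+1 : Nat) : Int) := by push_cast; ring
      rw [h1, PySem.List.pyGetD_natCast, PySem.List.pyGetD_natCast]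
    rw [hmap, adjprods]
    have : List.zipWith (· * ·) (a::b::t) (b::t) = (a*b) :: List.zipWith (· * ·) (b::t) t := rfl
    rw [this, PySem.List.max?_id_cons]
    simp only [Option.getD_some, List.drop]
    rw [foldl_zip_mul]
    have hA : PySem.List.pyGetD (a::b::t) 0 0 = a := by simp [PySem.List.pyGetD]
    have hB : PySem.List.pyGetD (a::b::t) 1 0 = b := by simp [PySem.List.pyGetD]
    rw [hA, hB]

-- ===== VERDICT (by name: the statement is the Claim_ definition above) =====
theorem solution_spec : Claim_equal_solution := by
  intro numbers _ hpre
  unfold Spec_solution solution solution_alt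
  simp only []
  rw [top2_eq _ hpre]
  by_cases hn : (numbers.filter (fun k => decide (k < 0))).length > 1
  · simp only [hn, if_true]
    rw [negmax_eq _ hn]
  · simp only [hn, if_false]
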